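-- pv_equiv track=rewrite | github.com/yuehaoshi/SpaceEfficientAlignmentWeb | local.py | find_start_local
-- ===== SOURCE A (Python) =====
-- def find_start_local(v, w, delta, i1, j1):
--     vp = v[0:i1:][::-1]
--     wp = w[0:j1:][::-1]
--     dp = [[-114514 for j in range(len(wp) + 1)] for i in range(2)]
--     curr = 0
--     ret = (-1, -1)
--     big = -1919810
--     for i in range(len(vp) + 1):
--         for j in range(len(wp) + 1):
--             dp[curr][j] = -114514
--             if i == 0 and j == 0:
--                 dp[curr][j] = 0
--             elif i == 0:
--                 dp[curr][j] = max(dp[curr][j], dp[curr][j - 1] + delta['-'][wp[j - 1]])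
--             elif j == 0:
--                 dp[curr][j] = max(dp[curr][j], dp[1 - curr][j] + delta[vp[i - 1]]['-'])
--             else:
--                 dp[curr][j] = max(dp[curr][j], dp[1 - curr][j] + delta[vp[i - 1]]['-'])
--                 dp[curr][j] = max(dp[curr][j], dp[curr][j - 1] + delta['-'][wp[j - 1]])
--                 dp[curr][j] = max(dp[curr][j], dp[1 - curr][j - 1] + delta[vp[i - 1]][wp[j - 1]])
--             if dp[curr][j] > big:
--                 big = dp[curr][j]
--                 ret = (i, j)
--         curr = 1 - curr
--     return (i1 - ret[0], j1 - ret[1])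
-- ===== SOURCE B (Python) =====
-- def find_start_local(v, w, delta, i1, j1):
--     vp = v[0:i1][::-1]
--     wp = w[0:j1][::-1]
--     n, m = len(vp), len(wp)
--     # wavefront fill: cells are computed anti-diagonal by anti-diagonal (d = i + j),
--     # so every cell's three neighbours already lie on earlier diagonals
--     M = [[0] * (m + 1) for _ in range(n + 1)]
--     for d in range(1, n + m + 1):
--         for i in range(max(0, d - m), min(n, d) + 1):
--             j = d - i
--             if i == 0:
--                 M[0][j] = max(-114514, M[0][j - 1] + delta['-'][wp[j - 1]])
--             elif j == 0:
--                 M[i][0] = max(-114514, M[i - 1][0] + delta[vp[i - 1]]['-'])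
--             else:
--                 M[i][j] = max(-114514,
--                               M[i - 1][j] + delta[vp[i - 1]]['-'],
--                               M[i][j - 1] + delta['-'][wp[j - 1]],
--                               M[i - 1][j - 1] + delta[vp[i - 1]][wp[j - 1]])
--     # separate row-major argmax scan; strict > keeps the earliest maximal cell
--     best, ret = -1919810, (-1, -1)
--     for i in range(n + 1):
--         for j in range(m + 1):
--             if M[i][j] > best:
--                 best, ret = M[i][j], (i, j)
--     return (i1 - ret[0], j1 - ret[1])
-- ===== Notes on version B (the rewrite author's own statement) =====
-- stated objective: alternative
-- what changed: A fills a rolling two-row buffer in row-major order and tracks the argmax inline during the fill; B fills a full matrix by anti-diagonal wavefronts (d = i + j), so every cell's three neighbours lie on earlier diagonals, and then finds the best-scoring start cell in a separate row-major scan.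
import Mathlib
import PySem

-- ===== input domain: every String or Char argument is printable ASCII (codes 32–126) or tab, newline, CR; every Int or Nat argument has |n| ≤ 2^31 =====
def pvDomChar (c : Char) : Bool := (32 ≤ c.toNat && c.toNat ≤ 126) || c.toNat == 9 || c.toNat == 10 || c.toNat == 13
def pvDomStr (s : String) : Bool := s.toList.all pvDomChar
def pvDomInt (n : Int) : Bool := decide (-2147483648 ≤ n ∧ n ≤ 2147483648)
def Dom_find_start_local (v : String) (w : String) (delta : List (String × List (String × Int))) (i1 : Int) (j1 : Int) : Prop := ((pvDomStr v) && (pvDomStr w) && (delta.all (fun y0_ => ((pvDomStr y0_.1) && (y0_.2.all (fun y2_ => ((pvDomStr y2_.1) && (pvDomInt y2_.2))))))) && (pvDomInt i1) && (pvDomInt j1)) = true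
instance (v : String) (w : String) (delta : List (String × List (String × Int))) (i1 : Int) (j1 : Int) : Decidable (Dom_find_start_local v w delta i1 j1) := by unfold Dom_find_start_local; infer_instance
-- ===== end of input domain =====

-- B replaces A's row-major rolling two-row fill with inline argmax by an anti-diagonal
-- wavefront fill of a full matrix plus a separate row-major argmax scan (objective: alternative).

-- ===== PORT A =====
-- shared dictionary access helper: delta[k1][k2]; the .getD defaults are never
-- reached under Pre_find_start_local (a missing key is a Python KeyError)
def chS (c : Char) : String := String.ofList [c]

def dget (delta : List (String × List (String × Int))) (k1 k2 : String) : Int :=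
  PySem.Dict.getD (PySem.Dict.mk (((PySem.Dict.mk delta).get? k1).getD [])) k2 0

-- the branch chain of A's inner loop body; prevRow = dp[1-curr], curRow = dp[curr]
def aCell (delta : List (String × List (String × Int))) (vp wp : List Char)
    (prevRow curRow : List Int) (i j : Nat) : Int :=
  if i = 0 ∧ j = 0 then 0
  else if i = 0 then
    max (-114514) (curRow.getD (j-1) 0 + dget delta "-" (chS (wp.getD (j-1) ' ')))
  else if j = 0 then
    max (-114514) (prevRow.getD j 0 + dget delta (chS (vp.getD (i-1) ' ')) "-")
  else
    max (max (max (-114514) (prevRow.getD j 0 + dget delta (chS (vp.getD (i-1) ' ')) "-"))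
             (curRow.getD (j-1) 0 + dget delta "-" (chS (wp.getD (j-1) ' '))))
        (prevRow.getD (j-1) 0 + dget delta (chS (vp.getD (i-1) ' ')) (chS (wp.getD (j-1) ' ')))

-- one iteration of A's inner j-loop: write dp[curr][j], update (big, ret)
def aStep (delta : List (String × List (String × Int))) (vp wp : List Char) (i : Nat)
    (st : List (List Int) × Nat × Int × Int × Int) (j : Nat) :
    List (List Int) × Nat × Int × Int × Int :=
  match st with
  | (dp, curr, big, r1, r2) =>
    let cell := aCell delta vp wp (dp.getD (1-curr) []) (dp.getD curr []) i j
    let dp' := dp.set curr ((dp.getD curr []).set j cell)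
    if cell > big then (dp', curr, cell, (i:Int), (j:Int)) else (dp', curr, big, r1, r2)

-- one iteration of A's outer i-loop (inner loop, then curr = 1 - curr)
def aOuterStep (delta : List (String × List (String × Int))) (vp wp : List Char)
    (st : List (List Int) × Nat × Int × Int × Int) (i : Nat) :
    List (List Int) × Nat × Int × Int × Int :=
  let r := (List.range (wp.length+1)).foldl (aStep delta vp wp i) st
  (r.1, 1 - r.2.1, r.2.2)

-- v[0:i1][::-1] is .reverse of the slice (PySem.List.slice?_none_none_neg_one)
def find_start_local (v : String) (w : String) (delta : List (String × List (String × Int))) (i1 : Int) (j1 : Int) : Int × Int :=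
  let vp := (PySem.List.slice v.toList (some 0) (some i1)).reverse
  let wp := (PySem.List.slice w.toList (some 0) (some j1)).reverse
  let dp0 : List (List Int) :=
    [List.replicate (wp.length+1) (-114514), List.replicate (wp.length+1) (-114514)]
  let st := (List.range (vp.length+1)).foldl (aOuterStep delta vp wp) (dp0, 0, -1919810, -1, -1)
  (i1 - st.2.2.2.1, j1 - st.2.2.2.2)

-- ===== PORT B =====
-- the cell value read off the partially filled full matrix M (Source B's three branches)
def bCellVal (delta : List (String × List (String × Int))) (vp wp : List Char)
    (M : List (List Int)) (i j : Nat) : Int :=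
  if i = 0 then
    max (-114514) ((M.getD 0 []).getD (j-1) 0 + dget delta "-" (chS (wp.getD (j-1) ' ')))
  else if j = 0 then
    max (-114514) ((M.getD (i-1) []).getD 0 0 + dget delta (chS (vp.getD (i-1) ' ')) "-")
  else
    max (max (max (-114514) ((M.getD (i-1) []).getD j 0 + dget delta (chS (vp.getD (i-1) ' ')) "-"))
             ((M.getD i []).getD (j-1) 0 + dget delta "-" (chS (wp.getD (j-1) ' '))))
        ((M.getD (i-1) []).getD (j-1) 0 + dget delta (chS (vp.getD (i-1) ' ')) (chS (wp.getD (j-1) ' ')))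

-- write the cell (i, d - i) of anti-diagonal d
def bDiagStep (delta : List (String × List (String × Int))) (vp wp : List Char) (d : Nat)
    (M : List (List Int)) (i : Nat) : List (List Int) :=
  M.set i ((M.getD i []).set (d - i) (bCellVal delta vp wp M i (d - i)))

-- one anti-diagonal d: i runs over range(max(0, d-m), min(n, d)+1) (Nat subtraction clamps at 0)
def bDiagFill (delta : List (String × List (String × Int))) (vp wp : List Char)
    (M : List (List Int)) (d : Nat) : List (List Int) :=
  (List.range' (d - wp.length) (min vp.length d + 1 - (d - wp.length))).foldl
    (bDiagStep delta vp wp d) M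

-- one row of the separate argmax scan
def bScanRow (M : List (List Int)) (m : Nat) (st : Int × Int × Int) (i : Nat) : Int × Int × Int :=
  (List.range (m+1)).foldl
    (fun st j => if (M.getD i []).getD j 0 > st.1 then ((M.getD i []).getD j 0, (i:Int), (j:Int)) else st) st

def find_start_local_alt (v : String) (w : String) (delta : List (String × List (String × Int))) (i1 : Int) (j1 : Int) : Int × Int :=
  let vp := (PySem.List.slice v.toList (some 0) (some i1)).reverse
  let wp := (PySem.List.slice w.toList (some 0) (some j1)).reverse
  let M := (List.range' 1 (vp.length + wp.length)).foldl (bDiagFill delta vp wp)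
    (List.replicate (vp.length+1) (List.replicate (wp.length+1) 0))
  let st := (List.range (vp.length+1)).foldl (bScanRow M wp.length) (-1919810, -1, -1)
  (i1 - st.2.1, j1 - st.2.2)

-- ===== PRECONDITION & SPEC =====
-- does delta[k] exist and contain '-' (if needDash) and every character of wp?
def keyOK (delta : List (String × List (String × Int))) (k : String) (needDash : Bool)
    (wp : List Char) : Bool :=
  match (PySem.Dict.mk delta).get? k with
  | none => false
  | some row =>
      (!needDash || ((PySem.Dict.mk row).get? "-").isSome)
        && wp.all (fun c => ((PySem.Dict.mk row).get? (chS c)).isSome)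

-- Pre_ excludes exactly the inputs on which A raises KeyError: a needed key of
-- delta (or of an inner dict) is missing for the reversed slices vp = v[0:i1][::-1],
-- wp = w[0:j1][::-1]
def Pre_find_start_local (v : String) (w : String) (delta : List (String × List (String × Int))) (i1 : Int) (j1 : Int) : Prop :=
  (let vp := (PySem.List.slice v.toList (some 0) (some i1)).reverse
   let wp := (PySem.List.slice w.toList (some 0) (some j1)).reverse
   ((wp.isEmpty || keyOK delta "-" false wp) && vp.all (fun c => keyOK delta (chS c) true wp)) = true)

instance (v : String) (w : String) (delta : List (String × List (String × Int))) (i1 : Int) (j1 : Int) : Decidable (Pre_find_start_local v w delta i1 j1) := by unfold Pre_find_start_local; infer_instance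

def pvWitness_find_start_local : String × String × (List (String × List (String × Int))) × Int × Int :=
  ("a", "a", [("-", [("-", 0), ("a", -1)]), ("a", [("-", -1), ("a", 2)])], 1, 1)

def Spec_find_start_local (v : String) (w : String) (delta : List (String × List (String × Int))) (i1 : Int) (j1 : Int) (out : Int × Int) : Prop := out = find_start_local_alt v w delta i1 j1
instance (v : String) (w : String) (delta : List (String × List (String × Int))) (i1 : Int) (j1 : Int) (out : Int × Int) : Decidable (Spec_find_start_local v w delta i1 j1 out) := by unfold Spec_find_start_local; infer_instance

-- ===== CLAIM (what is proved, stated in full; the proofs are below) =====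
def Claim_equal_find_start_local : Prop := ∀ (v : String) (w : String) (delta : List (String × List (String × Int))) (i1 : Int) (j1 : Int), Dom_find_start_local v w delta i1 j1 → Pre_find_start_local v w delta i1 j1 → Spec_find_start_local v w delta i1 j1 (find_start_local v w delta i1 j1)

-- ===== LEMMAS AND PROOFS =====

-- the ideal DP value of cell (i, j) (shared mathematical description of both fills)
def rf (delta : List (String × List (String × Int))) (vp wp : List Char) : Nat → Nat → Int
  | 0, 0 => 0
  | 0, j+1 => max (-114514) (rf delta vp wp 0 j + dget delta "-" (chS (wp.getD j ' ')))
  | i+1, 0 => max (-114514) (rf delta vp wp i 0 + dget delta (chS (vp.getD i ' ')) "-")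
  | i+1, j+1 =>
      max (max (max (-114514) (rf delta vp wp i (j+1) + dget delta (chS (vp.getD i ' ')) "-"))
               (rf delta vp wp (i+1) j + dget delta "-" (chS (wp.getD j ' '))))
          (rf delta vp wp i j + dget delta (chS (vp.getD i ' ')) (chS (wp.getD j ' ')))

-- the argmax update on the ideal value of cell (i, j)
def updF (delta : List (String × List (String × Int))) (vp wp : List Char) (i : Nat)
    (st : Int × Int × Int) (j : Nat) : Int × Int × Int :=
  if rf delta vp wp i j > st.1 then (rf delta vp wp i j, (i:Int), (j:Int)) else st

-- argmax state after scanning rows 0..k-1 completely (each of width m+1)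
def scanAll (delta : List (String × List (String × Int))) (vp wp : List Char) (m k : Nat) :
    Int × Int × Int :=
  (List.range k).foldl (fun st i => (List.range (m+1)).foldl (updF delta vp wp i) st)
    (-1919810, -1, -1)

-- getD of a list whose first k cells are the mapped range
lemma getD_of_take_map {f : Nat → Int} {xs : List Int} {k s : Nat} (hs : s < k)
    (h : xs.take k = (List.range k).map f) : xs.getD s 0 = f s := by
  rw [List.getD_eq_getElem?_getD, ← List.getElem?_take_of_lt hs, h]
  simp [hs]

-- writing cell k extends the correct prefix by one
lemma take_set_succ {xs : List Int} {k : Nat} {c : Int} (hk : k < xs.length) :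
    (xs.set k c).take (k+1) = xs.take k ++ [c] := by
  rw [List.take_add_one]
  congr 1
  · apply List.ext_getElem?
    intro n
    by_cases hn : n < k
    · simp [hn, List.getElem?_set]
      intro h; omega
    · simp [hn]
  · simp [hk]

-- A's inner loop: processing cells k..m of row i extends the written prefix and
-- applies the argmax updates for those cells
lemma aInner_go (delta : List (String × List (String × Int))) (vp wp : List Char) (i : Nat) :
    ∀ (l k : Nat), k + l = wp.length + 1 →
    ∀ (dp : List (List Int)) (curr : Nat) (big r1 r2 : Int),
    curr ≤ 1 → dp.length = 2 →
    (dp.getD curr []).length = wp.length + 1 →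
    (i ≠ 0 → dp.getD (1-curr) [] = (List.range (wp.length+1)).map (rf delta vp wp (i-1))) →
    (dp.getD curr []).take k = (List.range k).map (rf delta vp wp i) →
    ((List.range' k l).foldl (aStep delta vp wp i) (dp, curr, big, r1, r2)).2.1 = curr ∧
    ((List.range' k l).foldl (aStep delta vp wp i) (dp, curr, big, r1, r2)).1.length = 2 ∧
    ((List.range' k l).foldl (aStep delta vp wp i) (dp, curr, big, r1, r2)).1.getD (1-curr) [] = dp.getD (1-curr) [] ∧
    (((List.range' k l).foldl (aStep delta vp wp i) (dp, curr, big, r1, r2)).1.getD curr []).length = wp.length + 1 ∧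
    (((List.range' k l).foldl (aStep delta vp wp i) (dp, curr, big, r1, r2)).1.getD curr []).take (k+l) = (List.range (k+l)).map (rf delta vp wp i) ∧
    ((List.range' k l).foldl (aStep delta vp wp i) (dp, curr, big, r1, r2)).2.2 = (List.range' k l).foldl (updF delta vp wp i) (big, r1, r2) := by
  intro l
  induction l with
  | zero =>
    intro k hk dp curr big r1 r2 hcurr hdp hlen hprev htake
    exact ⟨rfl, hdp, rfl, hlen, htake, rfl⟩
  | succ l ih =>
    intro k hk dp curr big r1 r2 hcurr hdp hlen hprev htake
    have hkm : k < wp.length + 1 := by omega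
    -- the cell written at (i, k) is the ideal DP value
    have hcell : aCell delta vp wp (dp.getD (1-curr) []) (dp.getD curr []) i k = rf delta vp wp i k := by
      match i, k with
      | 0, 0 => simp [aCell, rf]
      | 0, s+1 =>
        have hs : (dp.getD curr []).getD s 0 = rf delta vp wp 0 s :=
          getD_of_take_map (by omega) htake
        simp only [List.getD_eq_getElem?_getD] at hs
        simp [aCell, rf, hs]
      | i'+1, 0 =>
        have hp := hprev (by omega)
        simp only [Nat.add_sub_cancel] at hp
        have h0 : (dp.getD (1-curr) []).getD 0 0 = rf delta vp wp i' 0 := by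
          rw [hp]; exact PySem.List.getD_map_range _ _ _ _ (by omega)
        simp only [List.getD_eq_getElem?_getD] at h0
        simp [aCell, rf, h0]
      | i'+1, s+1 =>
        have hp := hprev (by omega)
        simp only [Nat.add_sub_cancel] at hp
        have h1 : (dp.getD (1-curr) []).getD (s+1) 0 = rf delta vp wp i' (s+1) := by
          rw [hp]; exact PySem.List.getD_map_range _ _ _ _ (by omega)
        have h2 : (dp.getD (1-curr) []).getD s 0 = rf delta vp wp i' s := by
          rw [hp]; exact PySem.List.getD_map_range _ _ _ _ (by omega)
        have h3 : (dp.getD curr []).getD s 0 = rf delta vp wp (i'+1) s :=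
          getD_of_take_map (by omega) htake
        simp only [List.getD_eq_getElem?_getD] at h1 h2 h3
        simp [aCell, rf, h1, h2, h3]
    -- one aStep
    have hstep : aStep delta vp wp i (dp, curr, big, r1, r2) k
        = (dp.set curr ((dp.getD curr []).set k (rf delta vp wp i k)), curr,
           updF delta vp wp i (big, r1, r2) k) := by
      simp only [aStep, hcell, updF]
      split <;> rfl
    rw [List.range'_succ, List.foldl_cons, List.foldl_cons, hstep]
    -- shape of dp and curr
    obtain ⟨a, b, rfl⟩ := List.length_eq_two.mp hdp
    set dp' := ([a, b].set curr (([a, b].getD curr []).set k (rf delta vp wp i k))) with hdp'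
    rcases hu : updF delta vp wp i (big, r1, r2) k with ⟨big', r1', r2'⟩
    have hget_cur : dp'.getD curr [] = ([a,b].getD curr []).set k (rf delta vp wp i k) := by
      interval_cases curr <;> simp [hdp']
    have hget_prev : dp'.getD (1-curr) [] = [a,b].getD (1-curr) [] := by
      interval_cases curr <;> simp [hdp']
    have hlen' : dp'.length = 2 := by
      interval_cases curr <;> simp [hdp']
    have htake' : (dp'.getD curr []).take (k+1) = (List.range (k+1)).map (rf delta vp wp i) := by
      rw [hget_cur, take_set_succ (by omega), htake, List.range_succ, List.map_append, List.map_cons, List.map_nil]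
    have h := ih (k+1) (by omega) dp' curr big' r1' r2' hcurr hlen'
      (by rw [hget_cur]; simpa using hlen)
      (fun hi => by rw [hget_prev]; exact hprev hi)
      htake'
    refine ⟨h.1, h.2.1, ?_, h.2.2.2.1, ?_, h.2.2.2.2.2⟩
    · rw [h.2.2.1, hget_prev]
    · have : k + (l + 1) = (k+1) + l := by omega
      rw [this]; exact h.2.2.2.2.1

-- A's outer loop: after processing rows k..k+l-1 the argmax state is the scan of all rows so far
lemma aOuter_go (delta : List (String × List (String × Int))) (vp wp : List Char) :
    ∀ (l k : Nat) (dp : List (List Int)) (curr : Nat) (big r1 r2 : Int),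
    curr ≤ 1 → dp.length = 2 →
    (dp.getD curr []).length = wp.length + 1 →
    (dp.getD (1-curr) []).length = wp.length + 1 →
    (k ≠ 0 → dp.getD (1-curr) [] = (List.range (wp.length+1)).map (rf delta vp wp (k-1))) →
    (big, r1, r2) = scanAll delta vp wp wp.length k →
    ((List.range' k l).foldl (aOuterStep delta vp wp) (dp, curr, big, r1, r2)).2.2
      = scanAll delta vp wp wp.length (k+l) := by
  intro l
  induction l with
  | zero => intro k dp curr big r1 r2 _ _ _ _ _ hscan; exact hscan
  | succ l ih =>
    intro k dp curr big r1 r2 hcurr hdp hlenc hlenp hprev hscan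
    rw [List.range'_succ, List.foldl_cons]
    have h := aInner_go delta vp wp k (wp.length+1) 0 (by omega) dp curr big r1 r2
      hcurr hdp hlenc hprev (by simp)
    rcases hr : (List.range' 0 (wp.length+1)).foldl (aStep delta vp wp k) (dp, curr, big, r1, r2)
      with ⟨dpr, currr, bigr, r1r, r2r⟩
    have hrange : List.range (wp.length+1) = List.range' 0 (wp.length+1) := List.range_eq_range'
    rw [hr] at h
    have hstep : aOuterStep delta vp wp (dp, curr, big, r1, r2) k = (dpr, 1 - currr, bigr, r1r, r2r) := by
      simp only [aOuterStep, hrange, hr]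
    rw [hstep]
    obtain ⟨hc, hl2, hpr, hlc, htk, hsc⟩ := h
    have hc' : curr = currr := hc.symm
    subst hc'
    dsimp only at hpr hlc htk hsc
    simp only [Nat.zero_add] at htk
    have h11 : 1 - (1 - curr) = curr := by omega
    have hfull : dpr.getD curr [] = (List.range (wp.length+1)).map (rf delta vp wp k) := by
      rw [← htk]
      exact (List.take_of_length_le (by omega)).symm
    have hscan' : (bigr, r1r, r2r) = scanAll delta vp wp wp.length (k+1) := by
      calc (bigr, r1r, r2r)
          = (List.range' 0 (wp.length+1)).foldl (updF delta vp wp k) (big, r1, r2) := hsc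
        _ = (List.range (wp.length+1)).foldl (updF delta vp wp k) (scanAll delta vp wp wp.length k) := by
            rw [← hrange, hscan]
        _ = scanAll delta vp wp wp.length (k+1) := by
            simp only [scanAll, List.range_succ, List.foldl_append, List.foldl_cons, List.foldl_nil]
    have hmain := ih (k+1) dpr (1 - curr) bigr r1r r2r (by omega) hl2
      (by rw [hpr]; exact hlenp)
      (by rw [h11]; exact hlc)
      (fun _ => by rw [h11]; simpa using hfull)
      hscan'
    have hkl : k + (l+1) = (k+1) + l := by omega
    rw [hkl]
    exact hmain

-- getD after List.set at another index / at the written index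
lemma getD_set_ne {α : Type} {xs : List α} {dflt : α} {i i' : Nat} {a : α} (h : i ≠ i') :
    (xs.set i a).getD i' dflt = xs.getD i' dflt := by
  simp [List.getD_eq_getElem?_getD, List.getElem?_set_ne h]

lemma getD_set_self {α : Type} {xs : List α} {dflt : α} {i : Nat} {a : α} (h : i < xs.length) :
    (xs.set i a).getD i dflt = a := by
  simp [List.getD_eq_getElem?_getD, List.getElem?_set_self h]

-- invariant of B's wavefront fill: dimensions, and every cell on a diagonal < d is ideal
def InvB (delta : List (String × List (String × Int))) (vp wp : List Char) (d : Nat)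
    (M : List (List Int)) : Prop :=
  M.length = vp.length + 1 ∧
  (∀ i, i ≤ vp.length → (M.getD i []).length = wp.length + 1) ∧
  (∀ i j, i ≤ vp.length → j ≤ wp.length → i + j < d → (M.getD i []).getD j 0 = rf delta vp wp i j)

-- reading only earlier diagonals, the wavefront cell value is the ideal value
lemma bCellVal_correct (delta : List (String × List (String × Int))) (vp wp : List Char)
    (d : Nat) (M : List (List Int)) (i j : Nat)
    (hi : i ≤ vp.length) (hj : j ≤ wp.length) (hd : i + j = d) (hd1 : 1 ≤ d)
    (h : ∀ i' j', i' ≤ vp.length → j' ≤ wp.length → i' + j' < d →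
        (M.getD i' []).getD j' 0 = rf delta vp wp i' j') :
    bCellVal delta vp wp M i j = rf delta vp wp i j := by
  match i, j with
  | 0, 0 => omega
  | 0, j'+1 =>
    have h1 := h 0 j' (by omega) (by omega) (by omega)
    simp only [List.getD_eq_getElem?_getD] at h1
    simp [bCellVal, rf, h1]
  | i'+1, 0 =>
    have h1 := h i' 0 (by omega) (by omega) (by omega)
    simp only [List.getD_eq_getElem?_getD] at h1
    simp [bCellVal, rf, h1]
  | i'+1, j'+1 =>
    have h1 := h i' (j'+1) (by omega) (by omega) (by omega)
    have h2 := h (i'+1) j' (by omega) (by omega) (by omega)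
    have h3 := h i' j' (by omega) (by omega) (by omega)
    simp only [List.getD_eq_getElem?_getD] at h1 h2 h3
    simp [bCellVal, rf, h1, h2, h3]

-- B's inner loop over one anti-diagonal: the invariant is preserved and the
-- processed diagonal cells become ideal
lemma bDiag_go (delta : List (String × List (String × Int))) (vp wp : List Char)
    (d : Nat) (hd1 : 1 ≤ d) :
    ∀ (l k : Nat), d - wp.length ≤ k → k + l = min vp.length d + 1 →
    ∀ M, InvB delta vp wp d M →
    (∀ i', d - wp.length ≤ i' → i' < k → (M.getD i' []).getD (d - i') 0 = rf delta vp wp i' (d - i')) →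
    InvB delta vp wp d ((List.range' k l).foldl (bDiagStep delta vp wp d) M) ∧
    (∀ i', d - wp.length ≤ i' → i' < k + l →
      (((List.range' k l).foldl (bDiagStep delta vp wp d) M).getD i' []).getD (d - i') 0
        = rf delta vp wp i' (d - i')) := by
  intro l
  induction l with
  | zero =>
    intro k hlo hk M hInv hdiag
    exact ⟨hInv, fun i' h1 h2 => hdiag i' h1 (by omega)⟩
  | succ l ih =>
    intro k hlo hk M hInv hdiag
    obtain ⟨hlen, hrow, hcells⟩ := hInv
    have hkn : k ≤ vp.length := by omega
    have hkd : k ≤ d := by omega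
    have hjm : d - k ≤ wp.length := by omega
    have hsum : k + (d - k) = d := by omega
    have hcell : bCellVal delta vp wp M k (d - k) = rf delta vp wp k (d - k) :=
      bCellVal_correct delta vp wp d M k (d - k) hkn hjm hsum hd1 hcells
    rw [List.range'_succ, List.foldl_cons]
    have hM1 : bDiagStep delta vp wp d M k
        = M.set k ((M.getD k []).set (d - k) (rf delta vp wp k (d - k))) := by
      simp only [bDiagStep, hcell]
    rw [hM1]
    set M1 := M.set k ((M.getD k []).set (d - k) (rf delta vp wp k (d - k))) with hM1d
    have hget_k : M1.getD k [] = (M.getD k []).set (d - k) (rf delta vp wp k (d - k)) :=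
      getD_set_self (by omega)
    have hget_ne : ∀ i', i' ≠ k → M1.getD i' [] = M.getD i' [] := fun i' h =>
      getD_set_ne (fun he => h he.symm)
    have hInv1 : InvB delta vp wp d M1 := by
      refine ⟨by simp [hM1d, hlen], ?_, ?_⟩
      · intro i hi
        by_cases hik : i = k
        · subst hik
          rw [hget_k, List.length_set]
          exact hrow i hi
        · rw [hget_ne i hik]; exact hrow i hi
      · intro i j hi hj hlt
        by_cases hik : i = k
        · subst hik
          rw [hget_k, getD_set_ne (show d - i ≠ j by omega)]
          exact hcells i j hi hj hlt
        · rw [hget_ne i hik]; exact hcells i j hi hj hlt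
    have hdiag1 : ∀ i', d - wp.length ≤ i' → i' < k + 1 →
        (M1.getD i' []).getD (d - i') 0 = rf delta vp wp i' (d - i') := by
      intro i' h1 h2
      by_cases hik : i' = k
      · subst hik
        rw [hget_k, getD_set_self (by rw [hrow i' hkn]; omega)]
      · rw [hget_ne i' hik]
        exact hdiag i' h1 (by omega)
    have h := ih (k+1) (by omega) (by omega) M1 hInv1 hdiag1
    refine ⟨h.1, ?_⟩
    have hkl : k + (l + 1) = (k + 1) + l := by omega
    rw [hkl]
    exact h.2

-- B's outer loop over diagonals d..d+l-1 extends the invariant to d+l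
lemma bFill_go (delta : List (String × List (String × Int))) (vp wp : List Char) :
    ∀ (l d : Nat), 1 ≤ d → d + l ≤ vp.length + wp.length + 1 →
    ∀ M, InvB delta vp wp d M →
    InvB delta vp wp (d + l) ((List.range' d l).foldl (bDiagFill delta vp wp) M) := by
  intro l
  induction l with
  | zero => intro d _ _ M hInv; exact hInv
  | succ l ih =>
    intro d hd1 hdl M hInv
    rw [List.range'_succ, List.foldl_cons]
    have hdnm : d ≤ vp.length + wp.length := by omega
    have h := bDiag_go delta vp wp d hd1 (min vp.length d + 1 - (d - wp.length))
      (d - wp.length) (le_refl _) (by omega) M hInv (by intro i' h1 h2; omega)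
    have hInv' : InvB delta vp wp (d+1) (bDiagFill delta vp wp M d) := by
      obtain ⟨⟨hlen, hrow, hcells⟩, hdiag⟩ := h
      refine ⟨hlen, hrow, ?_⟩
      intro i j hi hj hlt
      by_cases hij : i + j < d
      · exact hcells i j hi hj hij
      · have hsum : i + j = d := by omega
        have hji : j = d - i := by omega
        rw [hji]
        exact hdiag i (by omega) (by omega)
    have hmain := ih (d+1) (by omega) (by omega) _ hInv'
    have hdl' : d + (l+1) = (d+1) + l := by omega
    rw [hdl']
    exact hmain

-- the initial all-zero matrix satisfies the invariant at d = 1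
lemma bInit_inv (delta : List (String × List (String × Int))) (vp wp : List Char) :
    InvB delta vp wp 1 (List.replicate (vp.length+1) (List.replicate (wp.length+1) 0)) := by
  refine ⟨by simp, ?_, ?_⟩
  · intro i hi
    rw [List.getD_eq_getElem?_getD, List.getElem?_replicate]
    simp [Nat.lt_succ_of_le hi]
  · intro i j hi hj hlt
    have hi0 : i = 0 := by omega
    have hj0 : j = 0 := by omega
    subst hi0; subst hj0
    simp [List.replicate_succ, rf]

-- B's separate scan over a matrix whose cells are all ideal is scanAll
lemma bScan_go (delta : List (String × List (String × Int))) (vp wp : List Char)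
    (M : List (List Int))
    (hM : ∀ i j, i ≤ vp.length → j ≤ wp.length → (M.getD i []).getD j 0 = rf delta vp wp i j) :
    (List.range (vp.length+1)).foldl (bScanRow M wp.length) (-1919810, -1, -1)
      = scanAll delta vp wp wp.length (vp.length+1) := by
  unfold scanAll
  apply PySem.List.foldl_congr_mem
  intro st i hi
  have hi' : i < vp.length + 1 := List.mem_range.mp hi
  unfold bScanRow
  apply PySem.List.foldl_congr_mem
  intro st' j hj
  have hj' : j < wp.length + 1 := List.mem_range.mp hj
  simp only [updF, hM i j (by omega) (by omega)]

-- ===== VERDICT (by name: the statement is the Claim_ definition above) =====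
theorem find_start_local_spec : Claim_equal_find_start_local := by
  intro v w delta i1 j1 _ _
  unfold Spec_find_start_local find_start_local find_start_local_alt
  set vp := (PySem.List.slice v.toList (some 0) (some i1)).reverse with hvp
  set wp := (PySem.List.slice w.toList (some 0) (some j1)).reverse with hwp
  -- A's loop nest computes the row-major argmax scan of the ideal matrix
  have hA : ((List.range (vp.length+1)).foldl (aOuterStep delta vp wp)
      ([List.replicate (wp.length+1) (-114514), List.replicate (wp.length+1) (-114514)],
       0, -1919810, -1, -1)).2.2 = scanAll delta vp wp wp.length (vp.length+1) := by
    have h := aOuter_go delta vp wp (vp.length+1) 0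
      [List.replicate (wp.length+1) (-114514), List.replicate (wp.length+1) (-114514)]
      0 (-1919810) (-1) (-1) (by omega) rfl (by simp) (by simp)
      (fun h => absurd rfl h) (by simp [scanAll])
    rw [List.range_eq_range']
    simpa using h
  -- B's wavefront fill produces the ideal matrix, its separate scan computes the same
  have hInv : InvB delta vp wp (1 + (vp.length + wp.length))
      ((List.range' 1 (vp.length + wp.length)).foldl (bDiagFill delta vp wp)
        (List.replicate (vp.length+1) (List.replicate (wp.length+1) 0))) :=
    bFill_go delta vp wp (vp.length + wp.length) 1 (le_refl _) (by omega) _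
      (bInit_inv delta vp wp)
  have hB : (List.range (vp.length+1)).foldl
      (bScanRow ((List.range' 1 (vp.length + wp.length)).foldl (bDiagFill delta vp wp)
        (List.replicate (vp.length+1) (List.replicate (wp.length+1) 0))) wp.length)
      (-1919810, -1, -1) = scanAll delta vp wp wp.length (vp.length+1) :=
    bScan_go delta vp wp _ (fun i j hi hj => hInv.2.2 i j hi hj (by omega))
  simp only []
  rw [hA, hB]
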